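-- pv_equiv track=rewrite | github.com/oinattan/linguagens-formais-automatos | Unidade1/S3/Hierarquia-de-Chomsky/src/exercises.py | pda_an_bn
-- ===== SOURCE A (Python) =====
-- from typing import List, Tuple
--
-- def pda_an_bn(s: str) -> bool:
--     """PDA não-determinístico simulado que reconhece a^n b^n.
--
--     Implementação determinística: empilha 'A' para cada 'a' lido, depois desempilha para cada 'b'.
--     Rejeita se houver símbolos diferentes de a/b ou se ordem for inválida.
--     Aceita a cadeia vazia.
--     """
--     stack: List[str] = []
--     stage = 'push'  # duas fases: push para 'a', then pop para 'b'
--     for ch in s: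
--         if stage == 'push':
--             if ch == 'a':
--                 stack.append('A')
--             elif ch == 'b':
--                 stage = 'pop'
--                 if not stack:
--                     return False
--                 stack.pop()
--             else:
--                 return False
--         else:  # pop stage
--             if ch == 'b':
--                 if not stack:
--                     return False
--                 stack.pop()
--             else:
--                 return False
--     return len(stack) == 0
-- ===== SOURCE B (Python) =====
-- def pda_an_bn(s: str) -> bool:
--     na = 0
--     while na < len(s) and s[na] == 'a':
--         na += 1
--     return s[na:] == 'b' * na
-- ===== Notes on version B (the rewrite author's own statement) =====
-- stated objective: simpler
-- what changed: Replaces the two-stage stack-machine simulation with a direct closed-form check: count the leading 'a' characters and compare the remaining suffix with 'b' repeated that many times.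
import Mathlib
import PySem

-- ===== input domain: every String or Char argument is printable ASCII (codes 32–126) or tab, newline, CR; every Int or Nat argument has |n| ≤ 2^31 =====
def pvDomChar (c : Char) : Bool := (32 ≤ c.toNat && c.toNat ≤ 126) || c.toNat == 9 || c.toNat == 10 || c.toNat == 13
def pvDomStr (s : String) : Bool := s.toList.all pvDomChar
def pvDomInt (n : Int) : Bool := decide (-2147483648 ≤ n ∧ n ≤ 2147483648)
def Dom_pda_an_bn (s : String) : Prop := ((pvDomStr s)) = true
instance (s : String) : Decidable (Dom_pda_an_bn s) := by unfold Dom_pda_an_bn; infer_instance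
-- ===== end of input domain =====

-- B replaces A's stack-machine simulation with a closed-form check (count leading 'a's, compare
-- the suffix with that many 'b's); same O(n) cost, simpler shape.

-- ===== PORT A =====
-- the for-loop of A: state = (stack, stage); stage 'push' is `true`, 'pop' is `false`;
-- early `return False` becomes a literal `false` result.
def pdaLoop : List Char → List Char → Bool → Bool
  | [], stack, _ => stack.length == 0
  | ch :: rest, stack, stage =>
    if stage then
      if ch = 'a' then pdaLoop rest ('A' :: stack) true
      else if ch = 'b' then
        match stack with
        | [] => false
        | _ :: t => pdaLoop rest t false
      else false
    else
      if ch = 'b' then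
        match stack with
        | [] => false
        | _ :: t => pdaLoop rest t false
      else false

def pda_an_bn (s : String) : Bool := pdaLoop s.toList [] true

-- ===== PORT B =====
-- Source B: count leading 'a's (the while loop = takeWhile over the char list), then compare
-- the suffix with 'b' * na.
def pda_an_bn_alt (s : String) : Bool :=
  let t := s.toList
  let na := (t.takeWhile (· == 'a')).length
  t.drop na == List.replicate na 'b'

-- ===== PRECONDITION & SPEC =====
def Spec_pda_an_bn (s : String) (out : Bool) : Prop := out = pda_an_bn_alt s
instance (s : String) (out : Bool) : Decidable (Spec_pda_an_bn s out) := by unfold Spec_pda_an_bn; infer_instance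

-- ===== CLAIM (what is proved, stated in full; the proofs are below) =====
def Claim_equal_pda_an_bn : Prop := ∀ (s : String), Dom_pda_an_bn s → Spec_pda_an_bn s (pda_an_bn s)

-- ===== LEMMAS AND PROOFS =====

-- pop phase: the remaining input must be exactly stack.length many 'b's
theorem pdaLoop_pop (l : List Char) : ∀ (stack : List Char),
    pdaLoop l stack false = (l == List.replicate stack.length 'b') := by
  induction l with
  | nil =>
    intro stack
    cases stack <;> simp [pdaLoop]
  | cons ch rest ih =>
    intro stack
    by_cases hb : ch = 'b'
    · subst hb
      cases stack with
      | nil => simp [pdaLoop]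
      | cons x t => simp [pdaLoop, ih t, List.replicate_succ]
    · cases stack with
      | nil => simp [pdaLoop, hb]
      | cons x t =>
        simp only [pdaLoop, List.length_cons, List.replicate_succ]
        simp [hb]

-- push phase: the result is the closed-form check of B, offset by the current stack height
theorem pdaLoop_push (l : List Char) : ∀ (stack : List Char),
    pdaLoop l stack true =
      (l.drop (l.takeWhile (· == 'a')).length ==
        List.replicate ((l.takeWhile (· == 'a')).length + stack.length) 'b') := by
  induction l with
  | nil =>
    intro stack
    cases stack <;> simp [pdaLoop]
  | cons ch rest ih =>
    intro stack
    by_cases ha : ch = 'a'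
    · subst ha
      have := ih ('A' :: stack)
      simp only [pdaLoop, List.takeWhile_cons, beq_self_eq_true, if_pos, List.length_cons,
        List.drop_succ_cons] at this ⊢
      rw [this]
      congr 2
      omega
    · by_cases hb : ch = 'b'
      · subst hb
        cases stack with
        | nil =>
          simp [pdaLoop, ha]
        | cons x t =>
          simp only [pdaLoop, if_neg (by decide : ¬('b' = 'a'))]
          rw [pdaLoop_pop rest t]
          simp [List.replicate]
      · simp only [pdaLoop, if_neg ha, if_neg hb]
        simp [show (ch == 'a') = false by simp [ha]]
        intro h
        cases stack with
        | nil => simp at h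
        | cons x t =>
          rw [List.length_cons, List.replicate_succ] at h
          exact hb (List.cons_eq_cons.mp h).1

-- ===== VERDICT (by name: the statement is the Claim_ definition above) =====
theorem pda_an_bn_spec : Claim_equal_pda_an_bn := by
  intro s _
  unfold Spec_pda_an_bn pda_an_bn pda_an_bn_alt
  rw [pdaLoop_push s.toList []]
  simp
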